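-- pv_equiv track=rewrite | github.com/laujingxuan/leetcode | PYTHON/KeysAndRooms.py | canVisitAllRoomsBFS
-- ===== SOURCE A (Python) =====
-- def canVisitAllRoomsBFS(rooms):
--     if len(rooms) <= 1:
--         return True
--     hasVisited = set()
--     hasVisited.add(0)
--     queue = []
--     queue.append(rooms[0])
--     while len(queue) > 0:
--         keys = queue.pop(0)
--         for key in keys:
--             if key not in hasVisited:
--                 queue.append(rooms[key])
--                 hasVisited.add(key)
--     return len(hasVisited) == len(rooms)
-- ===== SOURCE B (Python) =====
-- def canVisitAllRoomsBFS(rooms):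
--     if len(rooms) <= 1:
--         return True
--     visited = {0}
--     while True:
--         new = visited | {k for i in visited for k in rooms[i]}
--         if new == visited:
--             return len(visited) == len(rooms)
--         visited = new
-- ===== Notes on version B (the rewrite author's own statement) =====
-- stated objective: alternative
-- what changed: Replaces the explicit FIFO queue/worklist BFS with a queue-free fixpoint iteration: repeatedly union the visited set with all keys found in visited rooms until the set stops changing, then compare its size with the number of rooms; it trades the queue bookkeeping for re-scanning visited rooms each round (O(n*E) worst case vs A's O(n+E)).
import Mathlib
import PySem

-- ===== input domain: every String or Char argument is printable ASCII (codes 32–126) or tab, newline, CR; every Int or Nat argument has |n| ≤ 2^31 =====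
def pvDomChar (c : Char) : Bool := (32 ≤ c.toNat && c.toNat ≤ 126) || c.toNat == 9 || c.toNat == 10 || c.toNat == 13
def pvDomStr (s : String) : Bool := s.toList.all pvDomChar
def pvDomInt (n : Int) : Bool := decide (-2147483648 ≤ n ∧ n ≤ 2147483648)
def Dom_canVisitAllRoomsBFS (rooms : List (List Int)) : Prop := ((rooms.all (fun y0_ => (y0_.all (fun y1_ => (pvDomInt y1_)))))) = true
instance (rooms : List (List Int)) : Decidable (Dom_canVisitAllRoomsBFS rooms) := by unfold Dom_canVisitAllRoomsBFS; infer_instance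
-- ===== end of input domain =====

-- B replaces A's FIFO-queue BFS by a queue-free fixpoint iteration (grow the visited set with all
-- keys of visited rooms until it stops changing); same trivial-case guard, same value everywhere
-- both Pythons return (they raise IndexError on exactly the same inputs, which PySem maps to a
-- leaf via getD [] in both ports, so the ports agree unconditionally).

-- rooms[i]: exact where Python indexing succeeds; where Python raises IndexError both Pythons
-- raise together and neither returns, so the shared [] default never shows in a compared value.
def pvGetRoom (rooms : List (List Int)) (i : Int) : List Int :=
  (PySem.List.pyGet? rooms i).getD []

-- ===== PORT A =====
-- inner 'for key in keys' loop of A's while-loop body, over the state (hasVisited, queue)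
def bfsScan (rooms : List (List Int)) (keys : List Int)
    (st : PySem.Set Int × List (List Int)) : PySem.Set Int × List (List Int) :=
  keys.foldl (fun s k =>
    if PySem.Set.contains s.1 k then s
    else (PySem.Set.add s.1 k, s.2 ++ [pvGetRoom rooms k])) st

-- A's 'while len(queue) > 0' loop; the fuel only makes it total: the loop pops at most
-- one element per visited key, so it always stops within flatten-length + 1 iterations
def bfsLoop (rooms : List (List Int)) : Nat → PySem.Set Int → List (List Int) → PySem.Set Int
  | _, vis, [] => vis
  | 0, vis, _ :: _ => vis
  | fuel+1, vis, keys :: qs =>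
      let st := bfsScan rooms keys (vis, qs)
      bfsLoop rooms fuel st.1 st.2

def canVisitAllRoomsBFS (rooms : List (List Int)) : Bool :=
  if rooms.length ≤ 1 then true
  else
    let hasVisited : PySem.Set Int := PySem.Set.add PySem.Set.empty 0
    let final := bfsLoop rooms (rooms.flatten.length + 1) hasVisited [pvGetRoom rooms 0]
    final.length == rooms.length

-- ===== PORT B =====
-- 'visited | {k for i in visited for k in rooms[i]}' (a set built from a set: order-insensitive)
def satExpand (rooms : List (List Int)) (vis : PySem.Set Int) : PySem.Set Int :=
  vis.foldl (fun s i => PySem.Set.update s (pvGetRoom rooms i)) vis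

-- B's 'while True' loop; the fuel only makes it total: each non-final round strictly grows
-- the visited set, whose size never exceeds flatten-length + 1
def satLoop (rooms : List (List Int)) : Nat → PySem.Set Int → Bool
  | 0, vis => vis.length == rooms.length
  | fuel+1, vis =>
      let nw := satExpand rooms vis
      if PySem.Set.equal nw vis then vis.length == rooms.length
      else satLoop rooms fuel nw

def canVisitAllRoomsBFS_alt (rooms : List (List Int)) : Bool :=
  if rooms.length ≤ 1 then true
  else satLoop rooms (rooms.flatten.length + 1) (PySem.Set.ofList [0])

-- ===== PRECONDITION & SPEC =====
-- the set of raw keys the Python programs encounter: 0 plus everything found behind already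
-- encountered keys (an out-of-range key contributes no further keys: indexing it raises)
def pvReachSet (rooms : List (List Int)) : Nat → Finset Int
  | 0 => {0}
  | m+1 => pvReachSet rooms m ∪
      (pvReachSet rooms m).biUnion (fun i => ((PySem.List.pyGet? rooms i).getD []).toFinset)

-- Pre_ holds exactly where Python A returns: either the trivial-case shortcut fires, or every
-- key either of the start room or reachable behind encountered keys is a valid Python index
-- (A raises IndexError precisely when BFS meets an out-of-range key; B raises there too).
def Pre_canVisitAllRoomsBFS (rooms : List (List Int)) : Prop :=
  rooms.length ≤ 1 ∨
    ∀ i ∈ pvReachSet rooms (2 * rooms.length + 1),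
      ∀ k ∈ (PySem.List.pyGet? rooms i).getD [],
        PySem.Raise.InRange rooms.length k
instance (rooms : List (List Int)) : Decidable (Pre_canVisitAllRoomsBFS rooms) := by
  unfold Pre_canVisitAllRoomsBFS; infer_instance

def pvWitness_canVisitAllRoomsBFS : List (List Int) := [[1], [0, 2], []]

def Spec_canVisitAllRoomsBFS (rooms : List (List Int)) (out : Bool) : Prop := out = canVisitAllRoomsBFS_alt rooms
instance (rooms : List (List Int)) (out : Bool) : Decidable (Spec_canVisitAllRoomsBFS rooms out) := by unfold Spec_canVisitAllRoomsBFS; infer_instance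

-- ===== CLAIM (what is proved, stated in full; the proofs are below) =====
def Claim_equal_canVisitAllRoomsBFS : Prop := ∀ (rooms : List (List Int)), Dom_canVisitAllRoomsBFS rooms → Pre_canVisitAllRoomsBFS rooms → Spec_canVisitAllRoomsBFS rooms (canVisitAllRoomsBFS rooms)

-- ===== LEMMAS AND PROOFS =====

-- reachability of a (raw integer) key from room 0, over the ports' total room lookup
inductive Reach (rooms : List (List Int)) : Int → Prop
  | zero : Reach rooms 0
  | step {i k : Int} : Reach rooms i → k ∈ pvGetRoom rooms i → Reach rooms k

theorem pvGetRoom_cases (rooms : List (List Int)) (i : Int) :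
    pvGetRoom rooms i = [] ∨ pvGetRoom rooms i ∈ rooms := by
  unfold pvGetRoom
  cases h : PySem.List.pyGet? rooms i with
  | none => exact Or.inl rfl
  | some l => exact Or.inr (by simpa using PySem.List.mem_of_pyGet?_eq_some rooms h)

theorem reach_bound (rooms : List (List Int)) :
    ∀ k, Reach rooms k → k = 0 ∨ k ∈ rooms.flatten := by
  intro k hk
  induction hk with
  | zero => exact Or.inl rfl
  | step hri hmem ih =>
      rcases pvGetRoom_cases rooms _ with h | h
      · rw [h] at hmem; cases hmem
      · exact Or.inr (List.mem_flatten.mpr ⟨_, h, hmem⟩)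

theorem nodup_length_le (V : List Int) (hnd : V.Nodup) (L : List Int)
    (hb : ∀ x ∈ V, x = 0 ∨ x ∈ L) : V.length ≤ L.length + 1 := by
  have hsub : V.toFinset ⊆ insert (0 : Int) L.toFinset := by
    intro x hx
    rw [List.mem_toFinset] at hx
    rcases hb x hx with rfl | h
    · exact Finset.mem_insert_self _ _
    · exact Finset.mem_insert_of_mem (List.mem_toFinset.mpr h)
  calc V.length = V.toFinset.card := (List.toFinset_card_of_nodup hnd).symm
    _ ≤ (insert (0 : Int) L.toFinset).card := Finset.card_le_card hsub
    _ ≤ L.toFinset.card + 1 := Finset.card_insert_le _ _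
    _ ≤ L.length + 1 := by have := L.toFinset_card_le; omega

theorem length_eq_of_mem_iff (V W : List Int) (hV : V.Nodup) (hW : W.Nodup)
    (h : ∀ k, k ∈ V ↔ k ∈ W) : V.length = W.length :=
  ((List.perm_ext_iff_of_nodup hV hW).mpr h).length_eq

theorem length_lt_of_mem (V W : List Int) (hV : V.Nodup) (hW : W.Nodup)
    (hsub : ∀ x ∈ V, x ∈ W) (x : Int) (hxW : x ∈ W) (hxV : x ∉ V) :
    V.length < W.length := by
  have hss : V.toFinset ⊂ W.toFinset := by
    constructor
    · intro y hy; rw [List.mem_toFinset] at *; exact hsub y hy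
    · intro hcon
      exact hxV (by simpa [List.mem_toFinset] using hcon (by simpa [List.mem_toFinset] using hxW))
  calc V.length = V.toFinset.card := (List.toFinset_card_of_nodup hV).symm
    _ < W.toFinset.card := Finset.card_lt_card hss
    _ = W.length := List.toFinset_card_of_nodup hW

-- a nodup visited set that contains 0 and is key-closed is exactly the Reach set
theorem closed_char (rooms : List (List Int)) (vis : List Int) (h0 : 0 ∈ vis)
    (hsound : ∀ i ∈ vis, Reach rooms i)
    (hclosed : ∀ i ∈ vis, ∀ k ∈ pvGetRoom rooms i, k ∈ vis) :
    ∀ k, k ∈ vis ↔ Reach rooms k := by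
  intro k
  constructor
  · exact hsound k
  · intro hr
    induction hr with
    | zero => exact h0
    | step hri hmem ih => exact hclosed _ ih _ hmem

-- the inner for-loop of A: what it does to the state (visited, queue)
theorem bfsScan_spec (rooms : List (List Int)) (keys : List Int) :
    ∀ (vis : PySem.Set Int) (qs : List (List Int)),
    (bfsScan rooms keys (vis, qs)).1 = PySem.Set.update vis keys ∧
    (∀ q ∈ (bfsScan rooms keys (vis, qs)).2, q ∈ qs ∨ ∃ k ∈ keys, q = pvGetRoom rooms k) ∧
    (∀ q ∈ qs, q ∈ (bfsScan rooms keys (vis, qs)).2) ∧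
    (∀ k ∈ keys, k ∈ vis ∨ pvGetRoom rooms k ∈ (bfsScan rooms keys (vis, qs)).2) ∧
    (bfsScan rooms keys (vis, qs)).2.length + vis.length
      = qs.length + (bfsScan rooms keys (vis, qs)).1.length := by
  induction keys with
  | nil =>
      intro vis qs
      refine ⟨by simp [bfsScan, PySem.Set.update_nil], ?_, ?_, ?_, by simp [bfsScan]⟩
      · intro q hq; exact Or.inl (by simpa [bfsScan] using hq)
      · intro q hq; simpa [bfsScan] using hq
      · intro k hk; cases hk
  | cons k ks ih =>
      intro vis qs
      by_cases hk : k ∈ vis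
      · have hstep : bfsScan rooms (k :: ks) (vis, qs) = bfsScan rooms ks (vis, qs) := by
          simp [bfsScan, List.foldl_cons, hk]
        obtain ⟨h1, h2, h3, h4, h5⟩ := ih vis qs
        rw [hstep]
        refine ⟨?_, ?_, h3, ?_, ?_⟩
        · rw [h1, PySem.Set.update_cons, PySem.Set.add_of_mem hk]
        · intro q hq
          rcases h2 q hq with h | ⟨k', hk', he⟩
          · exact Or.inl h
          · exact Or.inr ⟨k', List.mem_cons_of_mem _ hk', he⟩
        · intro k' hk'
          rcases List.mem_cons.mp hk' with rfl | hk'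
          · exact Or.inl hk
          · exact h4 k' hk'
        · exact h5
      · have hstep : bfsScan rooms (k :: ks) (vis, qs)
            = bfsScan rooms ks (PySem.Set.add vis k, qs ++ [pvGetRoom rooms k]) := by
          simp [bfsScan, List.foldl_cons, hk]
        obtain ⟨h1, h2, h3, h4, h5⟩ := ih (PySem.Set.add vis k) (qs ++ [pvGetRoom rooms k])
        rw [hstep]
        have hKk : pvGetRoom rooms k ∈ (bfsScan rooms ks (PySem.Set.add vis k, qs ++ [pvGetRoom rooms k])).2 :=
          h3 _ (by simp)
        refine ⟨?_, ?_, ?_, ?_, ?_⟩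
        · rw [h1, PySem.Set.update_cons]
        · intro q hq
          rcases h2 q hq with h | ⟨k', hk', he⟩
          · rcases List.mem_append.mp h with h | h
            · exact Or.inl h
            · exact Or.inr ⟨k, List.mem_cons_self .., by simpa using h⟩
          · exact Or.inr ⟨k', List.mem_cons_of_mem _ hk', he⟩
        · intro q hq; exact h3 q (List.mem_append_left _ hq)
        · intro k' hk'
          rcases List.mem_cons.mp hk' with rfl | hk'
          · exact Or.inr hKk
          · rcases h4 k' hk' with h | h
            · rcases (PySem.Set.mem_add vis k k').mp h with h | rfl
              · exact Or.inl h
              · exact Or.inr hKk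
            · exact Or.inr h
        · have hlen : (PySem.Set.add vis k).length = vis.length + 1 := by
            rw [PySem.Set.add_of_not_mem hk, List.length_append, List.length_singleton]
          rw [List.length_append, List.length_singleton, hlen] at h5
          omega

-- membership after the expansion step of B
theorem foldl_update_mem (rooms : List (List Int)) (l : List Int) :
    ∀ (s : PySem.Set Int) (k : Int),
    k ∈ l.foldl (fun s i => PySem.Set.update s (pvGetRoom rooms i)) s ↔
      k ∈ s ∨ ∃ i ∈ l, k ∈ pvGetRoom rooms i := by
  induction l with
  | nil => intro s k; simp
  | cons i l ih =>
      intro s k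
      rw [List.foldl_cons, ih, PySem.Set.mem_update]
      constructor
      · rintro ((h | h) | ⟨j, hj, hk⟩)
        · exact Or.inl h
        · exact Or.inr ⟨i, List.mem_cons_self .., h⟩
        · exact Or.inr ⟨j, List.mem_cons_of_mem _ hj, hk⟩
      · rintro (h | ⟨j, hj, hk⟩)
        · exact Or.inl (Or.inl h)
        · rcases List.mem_cons.mp hj with rfl | hj
          · exact Or.inl (Or.inr hk)
          · exact Or.inr ⟨j, hj, hk⟩

theorem satExpand_mem (rooms : List (List Int)) (vis : PySem.Set Int) (k : Int) :
    k ∈ satExpand rooms vis ↔ k ∈ vis ∨ ∃ i ∈ vis, k ∈ pvGetRoom rooms i :=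
  foldl_update_mem rooms vis vis k

theorem foldl_update_nodup (rooms : List (List Int)) (l : List Int) :
    ∀ (s : PySem.Set Int), s.Nodup →
      (l.foldl (fun s i => PySem.Set.update s (pvGetRoom rooms i)) s).Nodup := by
  induction l with
  | nil => intro s hs; simpa using hs
  | cons i l ih =>
      intro s hs
      rw [List.foldl_cons]
      exact ih _ (PySem.Set.nodup_update _ _ hs)

theorem satExpand_nodup (rooms : List (List Int)) (vis : PySem.Set Int) (h : vis.Nodup) :
    (satExpand rooms vis).Nodup := foldl_update_nodup rooms vis vis h

-- A's while-loop computes exactly the Reach set (given enough fuel)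
theorem bfsLoop_spec (rooms : List (List Int)) :
    ∀ (fuel : Nat) (vis : PySem.Set Int) (queue : List (List Int)),
    vis.Nodup → 0 ∈ vis → (∀ i ∈ vis, Reach rooms i) →
    (∀ q ∈ queue, ∃ i, Reach rooms i ∧ q = pvGetRoom rooms i) →
    (∀ i ∈ vis, pvGetRoom rooms i ∈ queue ∨ ∀ k ∈ pvGetRoom rooms i, k ∈ vis) →
    queue.length + rooms.flatten.length + 1 ≤ fuel + vis.length →
    (bfsLoop rooms fuel vis queue).Nodup ∧
    (∀ k, k ∈ bfsLoop rooms fuel vis queue ↔ Reach rooms k) := by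
  intro fuel
  induction fuel with
  | zero =>
      intro vis queue hnd h0 hsound hq hclosed hfuel
      cases queue with
      | nil =>
          refine ⟨hnd, closed_char rooms vis h0 hsound ?_⟩
          intro i hi
          rcases hclosed i hi with h | h
          · cases h
          · exact h
      | cons q qs =>
          exfalso
          have hle : vis.length ≤ rooms.flatten.length + 1 :=
            nodup_length_le vis hnd rooms.flatten
              (fun x hx => reach_bound rooms x (hsound x hx))
          simp only [List.length_cons, Nat.zero_add] at hfuel
          omega
  | succ fuel ih =>
      intro vis queue hnd h0 hsound hq hclosed hfuel
      cases queue with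
      | nil =>
          refine ⟨hnd, closed_char rooms vis h0 hsound ?_⟩
          intro i hi
          rcases hclosed i hi with h | h
          · cases h
          · exact h
      | cons keys qs =>
          show (bfsLoop rooms fuel (bfsScan rooms keys (vis, qs)).1 (bfsScan rooms keys (vis, qs)).2).Nodup ∧ _
          obtain ⟨h1, h2, h3, h4, h5⟩ := bfsScan_spec rooms keys vis qs
          obtain ⟨i0, hri0, hkeys⟩ := hq keys (List.mem_cons_self ..)
          have hsub : ∀ x ∈ vis, x ∈ (bfsScan rooms keys (vis, qs)).1 := by
            intro x hx; rw [h1, PySem.Set.mem_update]; exact Or.inl hx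
          have hmem1 : ∀ x, x ∈ (bfsScan rooms keys (vis, qs)).1 ↔ x ∈ vis ∨ x ∈ keys := by
            intro x; rw [h1, PySem.Set.mem_update]
          apply ih
          · rw [h1]; exact PySem.Set.nodup_update _ _ hnd
          · exact hsub 0 h0
          · intro i hi
            rcases (hmem1 i).mp hi with h | h
            · exact hsound i h
            · exact Reach.step hri0 (by rw [← hkeys]; exact h)
          · intro q hq'
            rcases h2 q hq' with h | ⟨k, hk, he⟩
            · exact hq q (List.mem_cons_of_mem _ h)
            · exact ⟨k, Reach.step hri0 (by rw [← hkeys]; exact hk), he⟩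
          · intro i hi
            rcases (hmem1 i).mp hi with h | h
            · rcases hclosed i h with hmemq | hcl
              · rcases List.mem_cons.mp hmemq with heq | hmemq
                · refine Or.inr ?_
                  intro k hk
                  rw [hmem1]
                  exact Or.inr (by rw [heq] at hk; exact hk)
                · exact Or.inl (h3 _ hmemq)
              · exact Or.inr fun k hk => hsub k (hcl k hk)
            · rcases h4 i h with hmem | hmem
              · rcases hclosed i hmem with hmemq | hcl
                · rcases List.mem_cons.mp hmemq with heq | hmemq
                  · refine Or.inr ?_
                    intro k hk
                    rw [hmem1]
                    exact Or.inr (by rw [heq] at hk; exact hk)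
                  · exact Or.inl (h3 _ hmemq)
                · exact Or.inr fun k hk => hsub k (hcl k hk)
              · exact Or.inl hmem
          · simp only [List.length_cons] at hfuel
            omega

-- B's while-loop: its result is a size comparison of some nodup list with the Reach members
theorem satLoop_spec (rooms : List (List Int)) :
    ∀ (fuel : Nat) (vis : PySem.Set Int),
    vis.Nodup → 0 ∈ vis → (∀ i ∈ vis, Reach rooms i) →
    rooms.flatten.length + 2 ≤ fuel + vis.length →
    ∃ V : List Int, satLoop rooms fuel vis = (V.length == rooms.length) ∧
      V.Nodup ∧ (∀ k, k ∈ V ↔ Reach rooms k) := by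
  intro fuel
  induction fuel with
  | zero =>
      intro vis hnd h0 hsound hfuel
      exfalso
      have hle : vis.length ≤ rooms.flatten.length + 1 :=
        nodup_length_le vis hnd rooms.flatten
          (fun x hx => reach_bound rooms x (hsound x hx))
      omega
  | succ fuel ih =>
      intro vis hnd h0 hsound hfuel
      by_cases heq : PySem.Set.equal (satExpand rooms vis) vis = true
      · refine ⟨vis, ?_, hnd, ?_⟩
        · show (if PySem.Set.equal (satExpand rooms vis) vis then _ else _) = _
          rw [heq]; simp
        · refine closed_char rooms vis h0 hsound ?_
          intro i hi k hk
          have : k ∈ satExpand rooms vis := (satExpand_mem rooms vis k).mpr (Or.inr ⟨i, hi, hk⟩)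
          exact ((PySem.Set.equal_iff _ _).mp heq k).mp this
      · have hstep : satLoop rooms (fuel + 1) vis = satLoop rooms fuel (satExpand rooms vis) := by
          show (if PySem.Set.equal (satExpand rooms vis) vis then _ else _) = _
          rw [Bool.not_eq_true] at heq
          rw [heq]; simp
        rw [hstep]
        have hsub : ∀ x ∈ vis, x ∈ satExpand rooms vis :=
          fun x hx => (satExpand_mem rooms vis x).mpr (Or.inl hx)
        have hnd' := satExpand_nodup rooms vis hnd
        have hsound' : ∀ i ∈ satExpand rooms vis, Reach rooms i := by
          intro i hi
          rcases (satExpand_mem rooms vis i).mp hi with h | ⟨j, hj, hk⟩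
          · exact hsound i h
          · exact Reach.step (hsound j hj) hk
        have hgrow : vis.length < (satExpand rooms vis).length := by
          have hne : ¬ ∀ x, x ∈ satExpand rooms vis ↔ x ∈ vis := by
            intro hc; exact heq ((PySem.Set.equal_iff _ _).mpr hc)
          push Not at hne
          obtain ⟨x, hx⟩ := hne
          rcases hx with ⟨h1x, h2x⟩ | ⟨h1x, h2x⟩
          · exact length_lt_of_mem vis _ hnd hnd' hsub x h1x h2x
          · exact absurd (hsub x h2x) h1x
        exact ih (satExpand rooms vis) hnd' (hsub 0 h0) hsound' (by omega)

-- ===== VERDICT (by name: the statement is the Claim_ definition above) =====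
-- the ports in fact agree on every input of the domain; Pre_ is where that equality speaks
-- for the two Python programs (outside it both Pythons raise IndexError)
theorem canVisitAllRoomsBFS_spec : Claim_equal_canVisitAllRoomsBFS := by
  intro rooms _ _
  unfold Spec_canVisitAllRoomsBFS canVisitAllRoomsBFS canVisitAllRoomsBFS_alt
  by_cases h1 : rooms.length ≤ 1
  · rw [if_pos h1, if_pos h1]
  · rw [if_neg h1, if_neg h1]
    obtain ⟨VB, hB, hBnd, hBmem⟩ :=
      satLoop_spec rooms (rooms.flatten.length + 1) (PySem.Set.ofList [0])
        (by simp [PySem.Set.ofList])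
        (by simp [PySem.Set.ofList])
        (by intro i hi; simp [PySem.Set.ofList] at hi; subst hi; exact Reach.zero)
        (by have : (PySem.Set.ofList [0] : PySem.Set Int).length = 1 := by decide
            omega)
    rw [hB]
    have hvisA : (PySem.Set.add PySem.Set.empty 0 : PySem.Set Int) = [0] := by decide
    obtain ⟨hAnd, hAmem⟩ :=
      bfsLoop_spec rooms (rooms.flatten.length + 1) (PySem.Set.add PySem.Set.empty 0)
        [pvGetRoom rooms 0]
        (by rw [hvisA]; simp)
        (by rw [hvisA]; simp)
        (by intro i hi; rw [hvisA] at hi; simp at hi; subst hi; exact Reach.zero)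
        (by intro q hq; simp at hq; exact ⟨0, Reach.zero, hq⟩)
        (by intro i hi; rw [hvisA] at hi; simp at hi; subst hi
            exact Or.inl (List.mem_singleton.mpr rfl))
        (by rw [hvisA]; simp only [List.length_singleton]; omega)
    have hlen : (bfsLoop rooms (rooms.flatten.length + 1) (PySem.Set.add PySem.Set.empty 0)
        [pvGetRoom rooms 0]).length = VB.length := by
      refine length_eq_of_mem_iff _ _ hAnd hBnd ?_
      intro k; rw [hAmem k, hBmem k]
    exact congrArg (· == rooms.length) hlen
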